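-- pv_equiv track=rewrite | github.com/ColdHumour/ProjectEulerToolkit | modulo.py | _sum_over_mod
-- ===== SOURCE A (Python) =====
-- def _sum_over_mod(n):
--     """return n % 2 + n % 3 + ... + n % (n-1)"""
--
--     from itertools import takewhile, count
--
--     sm = i = 0
--     for i in takewhile(lambda x: n//x - n//(x+1) > 4, count(1)):
--         a = n % (n//(i+1) + 1)
--         b = n % (n//i) if i > 1 else 1
--         c = (a-b) // i + 1
--         sm += b*c + i*(c - 1)*c // 2
--     sm += sum(n % j for j in range(2, n//(i+1) + 1))
--     return sm
-- ===== SOURCE B (Python) =====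
-- def _sum_over_mod(n):
--     """return n % 2 + n % 3 + ... + n % (n-1)"""
--     if n <= 2:
--         return 0
--     total = (n - 2) * n
--     k = 2
--     while k < n:
--         q = n // k
--         k2 = min(n - 1, n // q)
--         total -= q * (k + k2) * (k2 - k + 1) // 2
--         k = k2 + 1
--     return total
-- ===== Notes on version B (the rewrite author's own statement) =====
-- stated objective: alternative
-- what changed: Replaced A's takewhile loop over small quotient values (per-block a/b/c arithmetic built from n % terms, plus a naive tail sum of n % j) by the classic divisor-block jump loop: start from total = (n-2)*n and subtract q*Gauss(k..k2) for each block k..k2 = n//(n//k) of constant quotient, with no modulo operations at all.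
import Mathlib
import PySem

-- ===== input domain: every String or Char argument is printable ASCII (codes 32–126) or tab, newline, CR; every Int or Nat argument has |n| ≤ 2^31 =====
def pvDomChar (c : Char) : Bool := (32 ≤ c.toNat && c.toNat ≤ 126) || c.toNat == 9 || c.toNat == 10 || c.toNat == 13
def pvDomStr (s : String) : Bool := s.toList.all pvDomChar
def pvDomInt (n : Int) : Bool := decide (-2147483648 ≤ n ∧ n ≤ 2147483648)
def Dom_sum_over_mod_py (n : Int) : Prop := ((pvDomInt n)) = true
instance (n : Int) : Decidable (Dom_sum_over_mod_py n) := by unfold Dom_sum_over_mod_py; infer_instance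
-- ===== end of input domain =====

-- B replaces A's takewhile-over-quotients summation (plus naive tail) by the classic
-- divisor-block jump loop k -> n//(n//k), subtracting Gauss sums from (n-2)*n; objective:
-- alternative (same O(sqrt n) cost, no modulo operations).

-- ===== PORT A =====

-- the 'for i in takewhile(...)' loop of A; x = xm1 + 1 is the current count(1) value,
-- i the Python loop variable (last processed x, 0 before the first iteration).
-- fuel is only a structural-termination guard: the condition forces n//x >= 5, hence
-- x <= n, so with fuel = n.toNat + 1 the guard is never the reason the loop stops.
def loopA (n : Int) (fuel : Nat) (xm1 : Nat) (sm i : Int) : Int × Int :=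
  match fuel with
  | 0 => (sm, i)
  | fuel + 1 =>
    let x : Int := (xm1 : Int) + 1
    if PySem.Int.floordiv n x - PySem.Int.floordiv n (x + 1) > 4 then
      let a := PySem.Int.mod n (PySem.Int.floordiv n (x + 1) + 1)
      let b := if x > 1 then PySem.Int.mod n (PySem.Int.floordiv n x) else 1
      let c := PySem.Int.floordiv (a - b) x + 1
      loopA n fuel (xm1 + 1) (sm + (b * c + PySem.Int.floordiv (x * (c - 1) * c) 2)) x
    else (sm, i)

def sum_over_mod_py (n : Int) : Int :=
  let p := loopA n (n.toNat + 1) 0 0 0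
  p.1 + ((PySem.List.pyRange 2 (PySem.Int.floordiv n (p.2 + 1) + 1)).map
          (fun j => PySem.Int.mod n j)).sum

-- ===== PORT B =====
-- the 'while k < n' loop of B; fuel is only a structural-termination guard: k grows by
-- at least 1 per iteration, so fuel = n.toNat never runs out before k reaches n.
def loopB (n : Int) (fuel : Nat) (k total : Int) : Int :=
  match fuel with
  | 0 => total
  | fuel + 1 =>
    if k < n then
      let q := PySem.Int.floordiv n k
      let k2 := min (n - 1) (PySem.Int.floordiv n q)
      loopB n fuel (k2 + 1) (total - PySem.Int.floordiv (q * (k + k2) * (k2 - k + 1)) 2)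
    else total

def sum_over_mod_py_alt (n : Int) : Int :=
  if n ≤ 2 then 0 else loopB n n.toNat 2 ((n - 2) * n)

-- ===== PRECONDITION & SPEC =====
def Spec_sum_over_mod_py (n : Int) (out : Int) : Prop := out = sum_over_mod_py_alt n
instance (n : Int) (out : Int) : Decidable (Spec_sum_over_mod_py n out) := by unfold Spec_sum_over_mod_py; infer_instance

-- ===== CLAIM (what is proved, stated in full; the proofs are below) =====
def Claim_equal_sum_over_mod_py : Prop := ∀ (n : Int), Dom_sum_over_mod_py n → Spec_sum_over_mod_py n (sum_over_mod_py n)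

-- ===== LEMMAS AND PROOFS =====

-- For x ≥ 1 and n < 0, n//x is nondecreasing in x, so A's takewhile condition never
-- holds for negative n; used by the n < 0 case of the proof.
theorem pv_floordiv_mono_neg (n x : Int) (hn : n < 0) (hx : 0 < x) :
    PySem.Int.floordiv n x ≤ PySem.Int.floordiv n (x + 1) := by
  have hx1 : (0:Int) < x + 1 := by linarith
  have hqr := PySem.Int.floordiv_mul_add_mod n (x + 1)
  have hr0 := PySem.Int.mod_nonneg n hx1
  have hrlt := PySem.Int.mod_lt n hx1
  set q := PySem.Int.floordiv n (x + 1) with hq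
  set r := PySem.Int.mod n (x + 1) with hr
  have hqneg : q ≤ -1 := by
    by_contra h
    have hq0 : 0 ≤ q := by omega
    have : 0 ≤ q * (x + 1) := mul_nonneg hq0 (by omega)
    omega
  have hsum : q + r < x := by omega
  have hlt : n < (q + 1) * x := by nlinarith
  have := (PySem.Int.floordiv_lt_iff_lt_mul (a := n) (b := x) (q := q + 1) hx).mpr hlt
  omega

-- T n a b = sum of n % j over j = a, a+1, …, b-1 (the common shape of A's tail sum and B)
def pvT (n a b : Int) : Int :=
  ((PySem.List.pyRange a b).map (fun j => PySem.Int.mod n j)).sum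

theorem pvT_nil (n a b : Int) (h : b ≤ a) : pvT n a b = 0 := by
  simp [pvT, PySem.List.pyRange_one_eq_nil h]

theorem pvT_succ (n a b : Int) (h : a ≤ b) :
    pvT n a (b + 1) = pvT n a b + PySem.Int.mod n b := by
  rw [pvT, PySem.List.pyRange_one_succ_right h]
  simp [pvT]

theorem pvT_split (n a m b : Int) (h1 : a ≤ m) (h2 : m ≤ b) :
    pvT n a b = pvT n a m + pvT n m b := by
  rw [pvT, PySem.List.pyRange_one_append a m b h1 h2]
  simp [pvT]

-- triangle numbers, as recursion
def pvTri : Nat → Int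
  | 0 => 0
  | c + 1 => pvTri c + c

theorem pvTri_two (c : Nat) : 2 * pvTri c = (c : Int) * ((c : Int) - 1) := by
  induction c with
  | zero => simp [pvTri]
  | succ c ih =>
    rw [pvTri]
    push_cast
    linear_combination ih

-- arithmetic series: if n % j = n - x*j on [lo, lo+c), then the block sums in closed form
theorem pvT_series (n x : Int) (c : Nat) (lo : Int)
    (h : ∀ j, lo ≤ j → j < lo + c → PySem.Int.mod n j = n - x * j) :
    pvT n lo (lo + c) = c * (n - x * lo) - x * pvTri c := by
  induction c with
  | zero => simp [pvT_nil, pvTri]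
  | succ c ih =>
    have hcast : lo + ((c : Int) + 1) = (lo + c) + 1 := by ring
    push_cast
    rw [hcast, pvT_succ n lo (lo + c) (by omega), ih (fun j hj1 hj2 => h j hj1 (by push_cast; linarith)),
        h (lo + c) (by omega) (by push_cast; linarith)]
    rw [pvTri]
    ring

-- on the block n//(x+1) < j ≤ n//x, the quotient n//j equals x, so n % j = n - x*j
theorem pv_mod_on_block (n x j : Int) (hx : 0 < x)
    (hlo : PySem.Int.floordiv n (x + 1) < j) (hhi : j ≤ PySem.Int.floordiv n x)
    (hj : 0 < j) :
    PySem.Int.mod n j = n - x * j := by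
  have h1 : j * x ≤ n := (PySem.Int.le_floordiv_iff_mul_le hx).mp hhi
  have h2 : n < j * (x + 1) := (PySem.Int.floordiv_lt_iff_lt_mul (by linarith)).mp hlo
  have hq : PySem.Int.floordiv n j = x := by
    rw [PySem.Int.floordiv_eq_iff_of_pos hj]
    constructor
    · linarith [mul_comm j x]
    · have : (x + 1) * j = j * (x + 1) := by ring
      linarith
  have := PySem.Int.floordiv_mul_add_mod n j
  rw [hq] at this
  linarith

theorem pv_fd_one (n : Int) : PySem.Int.floordiv n 1 = n := by
  rw [PySem.Int.floordiv_eq_iff_of_pos (by norm_num)]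
  constructor <;> linarith

theorem pv_fd_double (t : Int) : PySem.Int.floordiv (2 * t) 2 = t := by
  rw [PySem.Int.floordiv_eq_iff_of_pos (by norm_num)]
  constructor <;> linarith

theorem pv_block_eq (n x : Int) (hn : 0 ≤ n) (hx : 1 ≤ x)
    (hcond : PySem.Int.floordiv n x - PySem.Int.floordiv n (x + 1) > 4) :
    (let a := PySem.Int.mod n (PySem.Int.floordiv n (x + 1) + 1)
     let b := if x > 1 then PySem.Int.mod n (PySem.Int.floordiv n x) else 1
     let c := PySem.Int.floordiv (a - b) x + 1
     b * c + PySem.Int.floordiv (x * (c - 1) * c) 2) =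
    pvT n (PySem.Int.floordiv n (x + 1) + 1) (PySem.Int.floordiv n x + 1) := by
  have hx0 : (0:Int) < x := by linarith
  set q := PySem.Int.floordiv n (x + 1) with hqdef
  set r := PySem.Int.floordiv n x with hrdef
  have hq0 : 0 ≤ q := (PySem.Int.le_floordiv_iff_mul_le (by linarith)).mpr (by linarith)
  have hrq : q + 5 ≤ r := by omega
  have hmod : ∀ j, q + 1 ≤ j → j < (q + 1) + (r - q).toNat → PySem.Int.mod n j = n - x * j := by
    intro j hj1 hj2
    have hc : ((r - q).toNat : Int) = r - q := by omega
    exact pv_mod_on_block n x j hx0 (by omega) (by omega) (by omega)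
  have hT : pvT n (q + 1) (r + 1) = ((r - q).toNat : Int) * (n - x * (q + 1)) - x * pvTri (r - q).toNat := by
    have hc : ((r - q).toNat : Int) = r - q := by omega
    have : r + 1 = (q + 1) + ((r - q).toNat : Int) := by omega
    rw [this]
    exact pvT_series n x (r - q).toNat (q + 1) hmod
  have ha : PySem.Int.mod n (q + 1) = n - x * (q + 1) :=
    pv_mod_on_block n x (q + 1) hx0 (by omega) (by omega) (by omega)
  have hc : ((r - q).toNat : Int) = r - q := by omega
  rcases eq_or_lt_of_le hx with hx1 | hx2
  · -- x = 1
    have hx1' : x = 1 := hx1.symm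
    subst hx1'
    have hr1 : r = n := by rw [hrdef]; exact pv_fd_one n
    simp only [gt_iff_lt, lt_self_iff_false, if_false]
    rw [ha, pv_fd_one]
    have hca : (((n - q - 1).toNat : Nat) : Int) = n - q - 1 := by omega
    have htri2 : 2 * pvTri (n - q - 1).toNat = (n - q - 1) * (n - q - 2) := by
      have h2 := pvTri_two (n - q - 1).toNat
      rw [hca] at h2
      linear_combination h2
    have hbig : 1 * (n - 1 * (q + 1) - 1 + 1 - 1) * (n - 1 * (q + 1) - 1 + 1) =
        2 * pvTri (n - q - 1).toNat := by linear_combination -htri2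
    rw [hbig, pv_fd_double, hT]
    have hm : (r - q).toNat = (n - q - 1).toNat + 1 := by omega
    rw [hm, pvTri]
    push_cast
    rw [hca]
    linear_combination htri2
  · -- x ≥ 2
    have hb : (x:Int) > 1 := hx2
    rw [if_pos hb]
    simp only []
    have hbv : PySem.Int.mod n r = n - x * r :=
      pv_mod_on_block n x r hx0 (by omega) (by omega) (by omega)
    rw [ha, hbv]
    have hab : (n - x * (q + 1)) - (n - x * r) = x * (r - q - 1) := by ring
    have hcdiv : PySem.Int.floordiv ((n - x * (q + 1)) - (n - x * r)) x = r - q - 1 := by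
      rw [hab, PySem.Int.floordiv_eq_iff_of_pos hx0]
      constructor
      · linarith [mul_comm x (r - q - 1)]
      · nlinarith
    rw [hcdiv]
    set c := r - q - 1 + 1 with hcdef
    have hcc : c = r - q := by rw [hcdef]; ring
    have htri2 : 2 * pvTri (r - q).toNat = (r - q) * (r - q - 1) := by
      have := pvTri_two (r - q).toNat
      rw [hc] at this
      exact this
    have hdiv2 : PySem.Int.floordiv (x * (c - 1) * c) 2 = x * pvTri (r - q).toNat := by
      have hval : x * (c - 1) * c = 2 * (x * pvTri (r - q).toNat) := by
        rw [hcc]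
        linear_combination (-x) * htri2
      rw [hval, PySem.Int.floordiv_eq_iff_of_pos (by norm_num)]
      constructor <;> linarith
    rw [hdiv2, hT, hc, hcc]
    linear_combination x * htri2

-- loop invariant: what remains to add (the tail sum for the final i) is accounted for
theorem pv_loopA_invariant (n : Int) (hn : 0 ≤ n) : ∀ (fuel xm1 : Nat) (sm : Int),
    (loopA n fuel xm1 sm (xm1 : Int)).1 +
      pvT n 2 (PySem.Int.floordiv n ((loopA n fuel xm1 sm (xm1 : Int)).2 + 1) + 1) =
    sm + pvT n 2 (PySem.Int.floordiv n ((xm1 : Int) + 1) + 1) := by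
  intro fuel
  induction fuel with
  | zero => intro xm1 sm; rfl
  | succ fuel IH =>
    intro xm1 sm
    rw [loopA]
    simp only []
    by_cases hcond : PySem.Int.floordiv n ((xm1 : Int) + 1) - PySem.Int.floordiv n ((xm1 : Int) + 1 + 1) > 4
    · rw [if_pos hcond]
      set x : Int := (xm1 : Int) + 1 with hxdef
      have hx1 : 1 ≤ x := by omega
      have hblock := pv_block_eq n x hn hx1 hcond
      simp only [] at hblock
      set q := PySem.Int.floordiv n (x + 1) with hqdef
      set r := PySem.Int.floordiv n x with hrdef
      have hq0 : 0 ≤ q := (PySem.Int.le_floordiv_iff_mul_le (by linarith)).mpr (by linarith)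
      have hq1 : 1 ≤ q := by
        have hr5 : 5 ≤ r := by omega
        have hn5 : 5 * x ≤ n := (PySem.Int.le_floordiv_iff_mul_le (by linarith)).mp (by omega)
        exact (PySem.Int.le_floordiv_iff_mul_le (by linarith)).mpr (by linarith)
      -- the recursive call: its i argument is x = ((xm1+1 : Nat) : Int)
      have hcast : ((xm1 + 1 : Nat) : Int) = x := by push_cast; rw [hxdef]
      have hrec := IH (xm1 + 1)
        (sm + ((if x > 1 then PySem.Int.mod n r else 1) *
                 (PySem.Int.floordiv (PySem.Int.mod n (q + 1) - (if x > 1 then PySem.Int.mod n r else 1)) x + 1) +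
               PySem.Int.floordiv (x * ((PySem.Int.floordiv (PySem.Int.mod n (q + 1) - (if x > 1 then PySem.Int.mod n r else 1)) x + 1) - 1) *
                 (PySem.Int.floordiv (PySem.Int.mod n (q + 1) - (if x > 1 then PySem.Int.mod n r else 1)) x + 1)) 2))
      rw [hcast] at hrec
      rw [hrec]
      rw [← hqdef]
      have hsplit : pvT n 2 (r + 1) = pvT n 2 (q + 1) + pvT n (q + 1) (r + 1) :=
        pvT_split n 2 (q + 1) (r + 1) (by omega) (by omega)
      rw [hsplit, ← hblock]
      ring
    · rw [if_neg hcond]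

-- ===== B-side lemmas =====

theorem pv_fd_nonneg (n b : Int) (hn : 0 ≤ n) (hb : 0 < b) : 0 ≤ PySem.Int.floordiv n b :=
  (PySem.Int.le_floordiv_iff_mul_le hb).mpr (by linarith)

-- for 0 ≤ n the quotient n//b is antitone in the (positive) divisor
theorem pv_fd_anti (n a b : Int) (hn : 0 ≤ n) (ha : 0 < a) (hab : a ≤ b) :
    PySem.Int.floordiv n b ≤ PySem.Int.floordiv n a := by
  have hb : (0:Int) < b := by omega
  have h0 : 0 ≤ PySem.Int.floordiv n b := pv_fd_nonneg n b hn hb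
  have hmul := PySem.Int.floordiv_mul_add_mod n b
  have hm := PySem.Int.mod_nonneg n hb
  rw [PySem.Int.le_floordiv_iff_mul_le ha]
  have : PySem.Int.floordiv n b * a ≤ PySem.Int.floordiv n b * b :=
    mul_le_mul_of_nonneg_left hab h0
  linarith

-- U n a b = sum of (n // j) * j over j = a, a+1, …, b-1
def pvU (n a b : Int) : Int :=
  ((PySem.List.pyRange a b).map (fun j => PySem.Int.floordiv n j * j)).sum

theorem pvU_nil (n a b : Int) (h : b ≤ a) : pvU n a b = 0 := by
  simp [pvU, PySem.List.pyRange_one_eq_nil h]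

theorem pvU_succ (n a b : Int) (h : a ≤ b) :
    pvU n a (b + 1) = pvU n a b + PySem.Int.floordiv n b * b := by
  rw [pvU, PySem.List.pyRange_one_succ_right h]
  simp [pvU]

theorem pvU_split (n a m b : Int) (h1 : a ≤ m) (h2 : m ≤ b) :
    pvU n a b = pvU n a m + pvU n m b := by
  rw [pvU, PySem.List.pyRange_one_append a m b h1 h2]
  simp [pvU]

-- termwise n % j + (n // j) * j = n, summed over the interval
theorem pvT_add_pvU (n a : Int) (c : Nat) :
    pvT n a (a + c) + pvU n a (a + c) = c * n := by
  induction c with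
  | zero => simp [pvT_nil, pvU_nil]
  | succ c ih =>
    have hcast : a + ((c : Int) + 1) = (a + c) + 1 := by ring
    push_cast
    rw [hcast, pvT_succ n a (a + c) (by omega), pvU_succ n a (a + c) (by omega)]
    have hdm := PySem.Int.floordiv_mul_add_mod n (a + c)
    push_cast at ih
    linarith

-- constant-quotient block: the weighted sum is x times an arithmetic series
theorem pvU_series (n x : Int) (c : Nat) (lo : Int)
    (h : ∀ j, lo ≤ j → j < lo + c → PySem.Int.floordiv n j = x) :
    pvU n lo (lo + c) = x * (c * lo) + x * pvTri c := by
  induction c with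
  | zero => simp [pvU_nil, pvTri]
  | succ c ih =>
    have hcast : lo + ((c : Int) + 1) = (lo + c) + 1 := by ring
    push_cast
    rw [hcast, pvU_succ n lo (lo + c) (by omega),
        ih (fun j hj1 hj2 => h j hj1 (by push_cast; linarith)),
        h (lo + c) (by omega) (by push_cast; linarith)]
    rw [pvTri]
    push_cast
    ring

-- loop invariant of B: each pass subtracts exactly the U-sum of its block
theorem pv_loopB_inv (n : Int) (hn : 3 ≤ n) : ∀ (fuel : Nat) (k total : Int),
    2 ≤ k → n ≤ (fuel : Int) + k → loopB n fuel k total = total - pvU n k n := by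
  intro fuel
  induction fuel with
  | zero =>
    intro k total hk2 hfk
    rw [loopB, pvU_nil n k n (by push_cast at hfk; omega)]
    ring
  | succ fuel IH =>
    intro k total hk2 hfk
    rw [loopB]
    simp only []
    by_cases hkn : k < n
    · rw [if_pos hkn]
      set q := PySem.Int.floordiv n k with hqdef
      set k2 := min (n - 1) (PySem.Int.floordiv n q) with hk2def
      have hn0 : (0:Int) ≤ n := by omega
      have hk0 : (0:Int) < k := by omega
      have hq1 : 1 ≤ q := by
        rw [hqdef]
        exact (PySem.Int.le_floordiv_iff_mul_le hk0).mpr (by omega)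
      have hmulk := PySem.Int.floordiv_mul_add_mod n k
      have hmk := PySem.Int.mod_nonneg n hk0
      have hkq : k * q ≤ n := by nlinarith
      have hkk2 : k ≤ k2 := by
        rw [hk2def]
        exact le_min (by omega) ((PySem.Int.le_floordiv_iff_mul_le (by omega)).mpr hkq)
      have hk2n : k2 ≤ n - 1 := by rw [hk2def]; exact min_le_left _ _
      have hk2q : k2 ≤ PySem.Int.floordiv n q := by rw [hk2def]; exact min_le_right _ _
      have hblock : ∀ j, k ≤ j → j < k2 + 1 → PySem.Int.floordiv n j = q := by
        intro j hj1 hj2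
        have hj0 : (0:Int) < j := by omega
        have hjq : j * q ≤ n :=
          (PySem.Int.le_floordiv_iff_mul_le (by omega : (0:Int) < q)).mp (by omega)
        have hge : q ≤ PySem.Int.floordiv n j :=
          (PySem.Int.le_floordiv_iff_mul_le hj0).mpr (by linarith [mul_comm j q])
        have hle : PySem.Int.floordiv n j ≤ q := by
          rw [hqdef]; exact pv_fd_anti n k j hn0 hk0 hj1
        omega
      have hc : (((k2 - k + 1).toNat : Nat) : Int) = k2 - k + 1 := by omega
      have hend : k2 + 1 = k + (((k2 - k + 1).toNat : Nat) : Int) := by omega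
      have hU1 : pvU n k (k2 + 1) =
          q * ((((k2 - k + 1).toNat : Nat) : Int) * k) + q * pvTri (k2 - k + 1).toNat := by
        rw [hend]
        exact pvU_series n q (k2 - k + 1).toNat k (fun j hj1 hj2 => hblock j hj1 (by omega))
      have htri2 : 2 * pvTri (k2 - k + 1).toNat = (k2 - k + 1) * (k2 - k) := by
        have := pvTri_two (k2 - k + 1).toNat
        rw [hc] at this
        linear_combination this
      have hG : PySem.Int.floordiv (q * (k + k2) * (k2 - k + 1)) 2 = pvU n k (k2 + 1) := by
        have hval : q * (k + k2) * (k2 - k + 1) =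
            2 * (q * ((((k2 - k + 1).toNat : Nat) : Int) * k) + q * pvTri (k2 - k + 1).toNat) := by
          rw [hc]
          linear_combination (-q) * htri2
        rw [hval, pv_fd_double, ← hU1]
      have hrec := IH (k2 + 1)
        (total - PySem.Int.floordiv (q * (k + k2) * (k2 - k + 1)) 2) (by omega)
        (by push_cast at hfk ⊢; omega)
      rw [hrec, hG]
      have hsplit : pvU n k n = pvU n k (k2 + 1) + pvU n (k2 + 1) n :=
        pvU_split n k (k2 + 1) n (by omega) (by omega)
      rw [hsplit]
      ring
    · rw [if_neg hkn, pvU_nil n k n (by omega)]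
      ring

-- B computes exactly the mod sum over 2 … n-1
theorem pv_alt_eq_T (n : Int) : sum_over_mod_py_alt n = pvT n 2 n := by
  by_cases h2 : n ≤ 2
  · show (if n ≤ 2 then (0:Int) else loopB n n.toNat 2 ((n - 2) * n)) = pvT n 2 n
    rw [if_pos h2, pvT_nil n 2 n (by omega)]
  · have hn3 : (3:Int) ≤ n := by omega
    show (if n ≤ 2 then (0:Int) else loopB n n.toNat 2 ((n - 2) * n)) = pvT n 2 n
    rw [if_neg h2, pv_loopB_inv n hn3 n.toNat 2 ((n - 2) * n) (by omega) (by push_cast; omega)]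
    have h := pvT_add_pvU n 2 (n - 2).toNat
    have hc : (((n - 2).toNat : Nat) : Int) = n - 2 := by omega
    rw [show (2:Int) + (((n - 2).toNat : Nat) : Int) = n from by omega, hc] at h
    linarith

-- A's tail with i = 0 sums up to n//1 = n inclusive; dropping the zero term n % n gives B
theorem pv_full_eq_alt (n : Int) : pvT n 2 (n + 1) = sum_over_mod_py_alt n := by
  have halt : sum_over_mod_py_alt n = pvT n 2 n := pv_alt_eq_T n
  by_cases h2 : (2:Int) ≤ n
  · rw [halt, pvT_succ n 2 n h2]
    have : PySem.Int.mod n n = 0 := by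
      rw [PySem.Int.mod_eq_emod_of_pos (by omega)]
      exact Int.emod_self
    rw [this, add_zero]
  · rw [halt, pvT_nil n 2 (n + 1) (by omega), pvT_nil n 2 n (by omega)]

-- ===== VERDICT (by name: the statement is the Claim_ definition above) =====
theorem sum_over_mod_py_spec : Claim_equal_sum_over_mod_py := by
  intro n _
  show sum_over_mod_py n = sum_over_mod_py_alt n
  by_cases hn : (0:Int) ≤ n
  · have h := pv_loopA_invariant n hn (n.toNat + 1) 0 0
    simp only [Nat.cast_zero] at h
    have hA : sum_over_mod_py n =
        (loopA n (n.toNat + 1) 0 0 0).1 +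
          pvT n 2 (PySem.Int.floordiv n ((loopA n (n.toNat + 1) 0 0 0).2 + 1) + 1) := rfl
    rw [hA, h, zero_add, zero_add, pv_fd_one, pv_full_eq_alt]
  · -- n < 0: the takewhile condition fails at x = 1, the loop never runs
    have h1 := pv_floordiv_mono_neg n 1 (by omega) one_pos
    have hf : n.toNat + 1 = 1 := by omega
    have hstop : loopA n (n.toNat + 1) 0 0 0 = (0, 0) := by
      rw [hf, loopA]
      simp only [Nat.cast_zero, zero_add]
      rw [if_neg (by rw [pv_fd_one] at h1 ⊢; omega)]
    have hA : sum_over_mod_py n =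
        (loopA n (n.toNat + 1) 0 0 0).1 +
          pvT n 2 (PySem.Int.floordiv n ((loopA n (n.toNat + 1) 0 0 0).2 + 1) + 1) := rfl
    rw [hA, hstop]
    show (0:Int) + pvT n 2 (PySem.Int.floordiv n (0 + 1) + 1) = sum_over_mod_py_alt n
    simp only [zero_add]
    rw [pv_fd_one, pv_full_eq_alt]
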